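-- pv_equiv track=rewrite | github.com/nounome/pat | PAT/1010.py | to_jinzhi
-- ===== SOURCE A (Python) =====
-- def to_jinzhi(num,jinzhi):  #这里num是字符串
--     res=0
--     wei=1
--     for i in num[::-1]:
--         if i.isdigit():
--             res+=int(i)*wei
--             wei*=jinzhi
--         else:
--             i=10+ord(i)-ord('a')
--             res+=i*wei
--             wei*=jinzhi
--     return res
-- ===== SOURCE B (Python) =====
-- def to_jinzhi(num, jinzhi):
--     # Horner's method: one forward pass, single accumulator, no weight variable.
--     res = 0
--     for c in num:
--         res = res * jinzhi + (int(c) if c.isdigit() else 10 + ord(c) - ord('a'))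
--     return res
-- ===== Notes on version B (the rewrite author's own statement) =====
-- stated objective: idiomatic
-- what changed: Replaced the backward scan that maintains a separate running weight wei with Horner's method: a single forward pass over num with one accumulator res = res*jinzhi + digit value.
import Mathlib
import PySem

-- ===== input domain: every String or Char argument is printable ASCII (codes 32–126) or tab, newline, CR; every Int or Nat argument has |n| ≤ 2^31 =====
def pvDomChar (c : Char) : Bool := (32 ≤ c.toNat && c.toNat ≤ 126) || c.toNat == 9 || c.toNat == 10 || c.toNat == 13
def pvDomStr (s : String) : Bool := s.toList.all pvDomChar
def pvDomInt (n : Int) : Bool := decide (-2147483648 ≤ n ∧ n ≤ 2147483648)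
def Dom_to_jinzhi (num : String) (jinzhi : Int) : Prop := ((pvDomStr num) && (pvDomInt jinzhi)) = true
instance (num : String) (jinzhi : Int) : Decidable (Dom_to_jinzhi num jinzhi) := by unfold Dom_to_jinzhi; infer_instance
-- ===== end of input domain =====

-- B replaces A's backward scan with a separate weight by Horner's method (forward, one accumulator); idiomatic, same cost.

-- ===== PORT A =====
-- backward pass (num[::-1] = reverse) carrying (res, wei); int(i) on an ASCII digit char is exactly i.toNat - 48
def to_jinzhi (num : String) (jinzhi : Int) : Int :=
  (num.toList.reverse.foldl
    (fun (p : Int × Int) (i : Char) =>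
      if PySem.Chars.isdigit i then
        (p.1 + ((i.toNat : Int) - 48) * p.2, p.2 * jinzhi)
      else
        (p.1 + (10 + (i.toNat : Int) - 97) * p.2, p.2 * jinzhi))
    (0, 1)).1

-- ===== PORT B =====
-- Horner's method: forward pass, single accumulator
def to_jinzhi_alt (num : String) (jinzhi : Int) : Int :=
  num.toList.foldl
    (fun (res : Int) (c : Char) =>
      res * jinzhi +
        (if PySem.Chars.isdigit c then (c.toNat : Int) - 48
         else 10 + (c.toNat : Int) - 97))
    0

-- ===== PRECONDITION & SPEC =====
def Spec_to_jinzhi (num : String) (jinzhi : Int) (out : Int) : Prop := out = to_jinzhi_alt num jinzhi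
instance (num : String) (jinzhi : Int) (out : Int) : Decidable (Spec_to_jinzhi num jinzhi out) := by unfold Spec_to_jinzhi; infer_instance

-- ===== CLAIM (what is proved, stated in full; the proofs are below) =====
def Claim_equal_to_jinzhi : Prop := ∀ (num : String) (jinzhi : Int), Dom_to_jinzhi num jinzhi → Spec_to_jinzhi num jinzhi (to_jinzhi num jinzhi)

-- ===== LEMMAS AND PROOFS =====

-- the per-character value (proof abbreviation)
def pvVal (c : Char) : Int :=
  if PySem.Chars.isdigit c then (c.toNat : Int) - 48 else 10 + (c.toNat : Int) - 97

-- Horner fold from an arbitrary accumulator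
theorem horner_shift (j : Int) (l : List Char) : ∀ r : Int,
    l.foldl (fun res c => res * j + pvVal c) r
      = r * j ^ l.length + l.foldl (fun res c => res * j + pvVal c) 0 := by
  induction l with
  | nil => intro r; simp
  | cons c t ih =>
      intro r
      simp only [List.foldl_cons, List.length_cons]
      rw [ih (r * j + pvVal c), ih (0 * j + pvVal c)]
      ring

-- A's foldr form computes (Horner value, j ^ length)
theorem pair_foldr (j : Int) (l : List Char) :
    l.foldr
      (fun (i : Char) (p : Int × Int) =>
        if PySem.Chars.isdigit i then
          (p.1 + ((i.toNat : Int) - 48) * p.2, p.2 * j)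
        else
          (p.1 + (10 + (i.toNat : Int) - 97) * p.2, p.2 * j))
      (0, 1)
      = (l.foldl (fun res c => res * j + pvVal c) 0, j ^ l.length) := by
  induction l with
  | nil => simp
  | cons c t ih =>
      simp only [List.foldr_cons, List.foldl_cons, List.length_cons, ih]
      rw [horner_shift j t (0 * j + pvVal c)]
      unfold pvVal
      by_cases h : PySem.Chars.isdigit c = true <;>
        simp [h, pow_succ] <;> ring

theorem to_jinzhi_spec : Claim_equal_to_jinzhi := by
  intro num jinzhi _
  unfold Spec_to_jinzhi to_jinzhi to_jinzhi_alt
  rw [List.foldl_reverse, pair_foldr]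
  simp [pvVal]

-- ===== VERDICT (by name: the statement is the Claim_ definition above) =====
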